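-- pv_equiv track=rewrite | github.com/Severencir/steamos_ap_bizhelper | ap_bizhelper/dialog_shim.py | _parse_checklist_items
-- ===== SOURCE A (Python) =====
-- from typing import List, Optional, Sequence, Tuple
--
-- def _parse_checklist_items(argv: Sequence[str]) -> Optional[List[Tuple[bool, str]]]:
--     columns = [arg.split("=", 1)[1] for arg in argv if arg.startswith("--column=")]
--     if len(columns) < 2:
--         return None
--     values: List[str] = [arg for arg in argv if not arg.startswith("--")]
--     if len(values) % len(columns) != 0:
--         return None
--     rows: List[Tuple[bool, str]] = []
--     step = len(columns)
--     for idx in range(0, len(values), step):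
--         chunk = values[idx : idx + step]
--         if len(chunk) < 2:
--             return None
--         checked = chunk[0].strip().upper() == "TRUE"
--         label = chunk[1]
--         rows.append((checked, label))
--     return rows
-- ===== SOURCE B (Python) =====
-- from typing import List, Optional, Sequence, Tuple
--
-- def _parse_checklist_items(argv: Sequence[str]) -> Optional[List[Tuple[bool, str]]]:
--     columns = [arg.split("=", 1)[1] for arg in argv if arg.startswith("--column=")]
--     if len(columns) < 2:
--         return None
--     values: List[str] = [arg for arg in argv if not arg.startswith("--")]
--     step = len(columns)
--     if len(values) % step != 0:
--         return None
--     checks = values[0::step]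
--     labels = values[1::step]
--     return [(c.strip().upper() == "TRUE", l) for c, l in zip(checks, labels)]
-- ===== Notes on version B (the rewrite author's own statement) =====
-- stated objective: alternative
-- what changed: A's chunking loop over range(0, len(values), step) with a per-chunk length guard is replaced by two strided slices values[0::step] and values[1::step] zipped into rows; divisibility makes the dead chunk-length guard unnecessary.
import Mathlib
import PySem

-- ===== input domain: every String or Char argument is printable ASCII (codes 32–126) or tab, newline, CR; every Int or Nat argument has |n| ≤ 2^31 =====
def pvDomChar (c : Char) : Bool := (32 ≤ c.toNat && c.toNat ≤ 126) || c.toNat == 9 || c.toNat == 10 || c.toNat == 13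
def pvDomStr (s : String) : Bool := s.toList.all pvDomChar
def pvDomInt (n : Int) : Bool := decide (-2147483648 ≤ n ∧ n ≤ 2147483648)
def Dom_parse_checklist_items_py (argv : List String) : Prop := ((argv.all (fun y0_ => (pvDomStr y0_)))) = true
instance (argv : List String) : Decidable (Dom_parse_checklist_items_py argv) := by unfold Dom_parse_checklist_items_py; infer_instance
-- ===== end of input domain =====

-- B replaces A's chunking loop by two strided slices zipped together (same cost, different decomposition).

-- helpers shared by both ports (both Python versions contain these lines verbatim)
-- arg.split("=", 1)[1]; callers filter on startswith "--column=", so the split has a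
-- second part and both getD defaults are unreachable
def pvColAfterEq (a : String) : String :=
  (PySem.List.pyGet? ((PySem.Str.splitMax? a "=" 1).getD []) 1).getD ""

def pvColumns (argv : List String) : List String :=
  (argv.filter (fun a => PySem.Str.startswith a "--column=")).map pvColAfterEq

def pvValues (argv : List String) : List String :=
  argv.filter (fun a => !PySem.Str.startswith a "--")

-- c.strip().upper() == "TRUE"
def pvIsTrue (s : String) : Bool := PySem.Str.upper (PySem.Str.strip s) == "TRUE"

-- ===== PORT A =====
-- the for-loop over range(0, len(values), step); chunk[0]/chunk[1] are guarded by the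
-- length check, so the getD defaults are unreachable
def pvLoopA (values : List String) (step : Int) :
    List Int → List (Bool × String) → Option (List (Bool × String))
  | [], rows => some rows
  | idx :: rest, rows =>
    let chunk := PySem.List.slice values (some idx) (some (idx + step))
    if chunk.length < 2 then none
    else pvLoopA values step rest
      (rows ++ [(pvIsTrue ((PySem.List.pyGet? chunk 0).getD ""),
                 (PySem.List.pyGet? chunk 1).getD "")])

def parse_checklist_items_py (argv : List String) : Option (List (Bool × String)) :=
  let columns := pvColumns argv
  if columns.length < 2 then none
  else
    let values := pvValues argv
    if PySem.Int.mod (values.length : Int) (columns.length : Int) ≠ 0 then none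
    else pvLoopA values (columns.length : Int)
      (PySem.List.pyRange 0 (values.length : Int) (columns.length : Int)) []

-- ===== PORT B =====
-- step = len(columns) ≥ 2 ≠ 0 here, so both slice? calls return some and getD [] is unreachable
def parse_checklist_items_py_alt (argv : List String) : Option (List (Bool × String)) :=
  let columns := pvColumns argv
  if columns.length < 2 then none
  else
    let values := pvValues argv
    let step : Int := (columns.length : Int)
    if PySem.Int.mod (values.length : Int) step ≠ 0 then none
    else
      let checks := (PySem.List.slice? values (some 0) none step).getD []
      let labels := (PySem.List.slice? values (some 1) none step).getD []
      some ((checks.zip labels).map (fun p => (pvIsTrue p.1, p.2)))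

-- ===== PRECONDITION & SPEC =====
def Spec_parse_checklist_items_py (argv : List String) (out : Option (List (Bool × String))) : Prop := out = parse_checklist_items_py_alt argv
instance (argv : List String) (out : Option (List (Bool × String))) : Decidable (Spec_parse_checklist_items_py argv out) := by unfold Spec_parse_checklist_items_py; infer_instance

-- ===== CLAIM (what is proved, stated in full; the proofs are below) =====
def Claim_equal_parse_checklist_items_py : Prop := ∀ (argv : List String), Dom_parse_checklist_items_py argv → Spec_parse_checklist_items_py argv (parse_checklist_items_py argv)

-- ===== LEMMAS AND PROOFS =====

lemma pv_loopA_spec (values : List String) (step : Nat) (h2 : 2 ≤ step) :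
    ∀ (l : List Nat) (rows : List (Bool × String)),
      (∀ k ∈ l, step * k + step ≤ values.length) →
      pvLoopA values (step : Int) (l.map (fun k => ((step * k : Nat) : Int))) rows
        = some (rows ++ l.map (fun k =>
            (pvIsTrue (values.getD (step * k) ""), values.getD (step * k + 1) ""))) := by
  intro l
  induction l with
  | nil => intro rows _; simp [pvLoopA]
  | cons k rest ih =>
    intro rows hb
    have hk := hb k (by simp)
    have hcast : ((step * k : Nat) : Int) + (step : Int) = ((step * k + step : Nat) : Int) := by
      push_cast; ring
    have hchunk : PySem.List.slice values (some ((step * k : Nat) : Int))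
        (some (((step * k : Nat) : Int) + (step : Int)))
        = (values.drop (step * k)).take step := by
      rw [hcast, PySem.List.slice_natCast]
      congr 1
      omega
    simp only [pvLoopA, List.map_cons, hchunk]
    have hlen : ((values.drop (step * k)).take step).length = step := by
      simp [List.length_take, List.length_drop]
      omega
    rw [if_neg (by omega)]
    rw [ih (rows ++ _) (fun k hk => hb k (by simp [hk]))]
    have hg0 : (PySem.List.pyGet? ((values.drop (step * k)).take step) 0).getD ""
        = values.getD (step * k) "" := by
      simp [PySem.List.pyGet?, PySem.List.pyIdx?, hlen, List.getD_eq_getElem?_getD,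
        List.getElem?_take, List.getElem?_drop]
      simp [show 0 < step by omega]
    have hg1 : (PySem.List.pyGet? ((values.drop (step * k)).take step) 1).getD ""
        = values.getD (step * k + 1) "" := by
      simp [PySem.List.pyGet?, PySem.List.pyIdx?, hlen, List.getD_eq_getElem?_getD,
        List.getElem?_take, List.getElem?_drop]
      simp [show 1 < step by omega]
    simp [hg0, hg1]

lemma pv_main (values : List String) (step m : Nat) (h2 : 2 ≤ step)
    (hm : values.length = step * m) :
    pvLoopA values (step : Int) (PySem.List.pyRange 0 (values.length : Int) (step : Int)) []
      = some ((((PySem.List.slice? values (some 0) none (step : Int)).getD []).zip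
               ((PySem.List.slice? values (some 1) none (step : Int)).getD [])).map
              (fun p => (pvIsTrue p.1, p.2))) := by
  have hs0 : (step : Int) ≠ 0 := by omega
  rcases Nat.eq_zero_or_pos m with hm0 | hmpos
  · subst hm0
    rw [Nat.mul_zero] at hm
    have hv : values = [] := List.eq_nil_of_length_eq_zero hm
    subst hv
    simp [pvLoopA, PySem.List.pyRange, PySem.List.slice?, PySem.List.sliceIndices, show step ≠ 0 by omega]
  · have hlen2 : 2 ≤ values.length := by
      have := Nat.mul_le_mul h2 hmpos
      omega
    have hdiv0 : (((values.length : Int)) + (step : Int) - 1) / (step : Int) = (m : Int) := by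
      have he : ((values.length : Int)) + (step : Int) - 1
          = ((step : Int) - 1) + (m : Int) * (step : Int) := by
        have : (values.length : Int) = (step : Int) * (m : Int) := by exact_mod_cast hm
        rw [this]; ring
      rw [he, Int.add_mul_ediv_right _ _ hs0,
        Int.ediv_eq_zero_of_lt (by omega) (by omega)]
      ring
    have hdiv1 : (((values.length : Int)) - 1 + (step : Int) - 1) / (step : Int) = (m : Int) := by
      have he : ((values.length : Int)) - 1 + (step : Int) - 1
          = ((step : Int) - 2) + (m : Int) * (step : Int) := by
        have : (values.length : Int) = (step : Int) * (m : Int) := by exact_mod_cast hm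
        rw [this]; ring
      rw [he, Int.add_mul_ediv_right _ _ hs0,
        Int.ediv_eq_zero_of_lt (by omega) (by omega)]
      ring
    have hRange : PySem.List.pyRange 0 (values.length : Int) (step : Int)
        = (List.range m).map (fun k => ((step * k : Nat) : Int)) := by
      rw [PySem.List.pyRange_of_pos 0 (values.length : Int) (by omega)]
      rw [if_pos (by omega)]
      have hc : ((values.length : Int) - 0 + (step : Int) - 1) / (step : Int) = (m : Int) := by
        rw [sub_zero]; exact hdiv0
      rw [hc]
      simp only [Int.toNat_natCast]
      refine List.map_congr_left (fun k hk => ?_)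
      push_cast
      ring
    have hget : ∀ i : Nat, i < values.length → values[i]? = some (values.getD i "") := by
      intro i hi
      rw [List.getElem?_eq_getElem hi, List.getD_eq_getElem _ _ hi]
    have hmul : ∀ k : Nat, k < m → step * k + step ≤ values.length := by
      intro k hk
      have h1 : step * (k + 1) ≤ step * m := Nat.mul_le_mul_left step hk
      have h2' : step * (k + 1) = step * k + step := by ring
      omega
    have hstride : ∀ (a : Nat), a < 2 →
        (List.range m).filterMap (fun k : Nat => values[((a : Int) + (step : Int) * (k : Int)).toNat]?)
          = (List.range m).map (fun k => values.getD (step * k + a) "") := by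
      intro a ha
      calc (List.range m).filterMap (fun k : Nat => values[((a : Int) + (step : Int) * (k : Int)).toNat]?)
          = (List.range m).filterMap (some ∘ fun k => values.getD (step * k + a) "") := by
            refine List.filterMap_congr (fun k hk => ?_)
            rw [List.mem_range] at hk
            have hlt : step * k + a < values.length := by
              have := hmul k hk
              omega
            have hcast : ((a : Int) + (step : Int) * (k : Int)).toNat = step * k + a := by
              omega
            rw [hcast]
            exact hget _ hlt
        _ = (List.range m).map (fun k => values.getD (step * k + a) "") := by
            rw [List.filterMap_eq_map]
    have hchecks : PySem.List.slice? values (some 0) none (step : Int)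
        = some ((List.range m).map (fun k => values.getD (step * k) "")) := by
      unfold PySem.List.slice? PySem.List.sliceIndices
      rw [if_neg hs0]
      simp only [if_neg (by omega : ¬ ((step : Int) < 0)), if_pos (by omega : (0 : Int) < (step : Int))]
      rw [if_neg (by omega : ¬ ((0 : Int) < 0)), min_eq_left (by omega)]
      rw [if_pos (by omega : (0 : Int) < (values.length : Int)), sub_zero]
      rw [hdiv0]
      simp only [Int.toNat_natCast]
      have := hstride 0 (by omega)
      simp only [Nat.cast_zero] at this
      rw [this]
      simp
    have hlabels : PySem.List.slice? values (some 1) none (step : Int)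
        = some ((List.range m).map (fun k => values.getD (step * k + 1) "")) := by
      unfold PySem.List.slice? PySem.List.sliceIndices
      rw [if_neg hs0]
      simp only [if_neg (by omega : ¬ ((step : Int) < 0)), if_pos (by omega : (0 : Int) < (step : Int))]
      rw [if_neg (by omega : ¬ ((1 : Int) < 0)), min_eq_left (by omega)]
      rw [if_pos (by omega : (1 : Int) < (values.length : Int))]
      rw [hdiv1]
      simp only [Int.toNat_natCast]
      have := hstride 1 (by omega)
      simp only [Nat.cast_one] at this
      rw [this]
    rw [hRange, pv_loopA_spec values step h2 (List.range m) []
      (fun k hk => hmul k (List.mem_range.mp hk))]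
    rw [hchecks, hlabels]
    simp only [Option.getD_some, List.nil_append, List.zip_map']
    rw [List.map_map]
    rfl

-- ===== VERDICT (by name: the statement is the Claim_ definition above) =====
theorem parse_checklist_items_py_spec : Claim_equal_parse_checklist_items_py := by
  intro argv _
  unfold Spec_parse_checklist_items_py parse_checklist_items_py parse_checklist_items_py_alt
  simp only []
  by_cases hc : (pvColumns argv).length < 2
  · simp [hc]
  · rw [if_neg hc, if_neg hc]
    by_cases hmod : PySem.Int.mod ((pvValues argv).length : Int) ((pvColumns argv).length : Int) ≠ 0
    · rw [if_pos hmod, if_pos hmod]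
    · rw [if_neg hmod, if_neg hmod]
      have hdvd : (pvValues argv).length % (pvColumns argv).length = 0 := by
        rw [not_not] at hmod
        unfold PySem.Int.mod at hmod
        rw [Int.fmod_eq_emod] at hmod
        simp at hmod
        omega
      exact pv_main (pvValues argv) (pvColumns argv).length
        ((pvValues argv).length / (pvColumns argv).length) (by omega)
        (Nat.mul_div_cancel' (Nat.dvd_of_mod_eq_zero hdvd)).symm
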